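-- pv_equiv track=rewrite | github.com/Seonghun337/algorithm | StudyLog/BOJ_11726_2n_타일링.py | rec
-- ===== SOURCE A (Python) =====
-- def rec(n,dp):
--     if n <= 0:
--         return 0
--     if n == 1:
--         return 1
--     if n == 2:
--         return 2
--     if dp[n] != -1:
--         return dp[n]
--     else:
--         new = rec(n-2,dp) + rec(n-1,dp)
--         dp[n] = new
--         return new
-- ===== SOURCE B (Python) =====
-- def rec(n, dp):
--     if n <= 0:
--         return 0
--     if n == 1:
--         return 1
--     if n == 2:
--         return 2
--     def val(j):
--         if j <= 0:
--             return 0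
--         if j == 1:
--             return 1
--         if j == 2:
--             return 2
--         return dp[j]
--     for i in range(3, n + 1):
--         if dp[i] == -1:
--             dp[i] = val(i - 2) + val(i - 1)
--     return dp[n]
-- ===== Notes on version B (the rewrite author's own statement) =====
-- stated objective: alternative
-- what changed: Replaces A's top-down memoized recursion by an iterative bottom-up loop that fills the dp table from 3 to n (keeping the -1 memo check and a small base-case value helper), then returns dp[n].
import Mathlib
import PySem

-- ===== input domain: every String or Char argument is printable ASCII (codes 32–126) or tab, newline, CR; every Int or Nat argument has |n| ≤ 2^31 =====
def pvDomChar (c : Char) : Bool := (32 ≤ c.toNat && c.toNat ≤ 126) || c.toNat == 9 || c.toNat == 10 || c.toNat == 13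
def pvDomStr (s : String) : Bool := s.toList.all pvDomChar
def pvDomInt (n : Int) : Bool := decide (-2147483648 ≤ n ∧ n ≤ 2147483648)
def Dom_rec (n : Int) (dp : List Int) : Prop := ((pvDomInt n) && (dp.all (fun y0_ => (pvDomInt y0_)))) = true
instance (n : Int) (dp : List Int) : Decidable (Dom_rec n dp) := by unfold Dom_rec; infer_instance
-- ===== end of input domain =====

-- B replaces A's memoized recursion by an iterative bottom-up fill of the same memo table (same return
-- value; equivalence is about the RETURN value — B may write memo entries that A's dp[n] short-circuit skips).

-- ===== PORT A =====
-- A mutates dp; the port threads the list as state: recAux returns (return value, mutated dp),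
-- none exactly where Python raises IndexError.
def recAux (n : Int) (dp : List Int) : Option (Int × List Int) :=
  if n ≤ 0 then some (0, dp)
  else if n = 1 then some (1, dp)
  else if n = 2 then some (2, dp)
  else
    match PySem.List.pyGet? dp n with
    | none => none
    | some v =>
      if v ≠ -1 then some (v, dp)
      else
        match recAux (n - 2) dp with
        | none => none
        | some (a, dp1) =>
          match recAux (n - 1) dp1 with
          | none => none
          | some (b, dp2) =>
            match PySem.List.pySet? dp2 n (a + b) with
            | none => none
            | some dp3 => some (a + b, dp3)
  termination_by n.toNat
  decreasing_by all_goals omega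

def rec (n : Int) (dp : List Int) : Int :=
  match recAux n dp with
  | some p => p.1
  | none => 0

-- ===== PORT B =====
-- helper 'val' of Source B: value of index j (base cases inline, else dp[j]); none = IndexError
def valB (dp : List Int) (j : Int) : Option Int :=
  if j ≤ 0 then some 0
  else if j = 1 then some 1
  else if j = 2 then some 2
  else PySem.List.pyGet? dp j

-- one iteration of Source B's 'for i in range(3, n+1)' loop body over the mutable dp
def stepB (acc : Option (List Int)) (i : Int) : Option (List Int) :=
  match acc with
  | none => none
  | some dp =>
    match PySem.List.pyGet? dp i with
    | none => none
    | some v =>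
      if v = -1 then
        match valB dp (i - 2), valB dp (i - 1) with
        | some a, some b => PySem.List.pySet? dp i (a + b)
        | _, _ => none
      else some dp

def rec_alt (n : Int) (dp : List Int) : Int :=
  if n ≤ 0 then 0
  else if n = 1 then 1
  else if n = 2 then 2
  else
    match (PySem.List.pyRange 3 (n + 1) 1).foldl stepB (some dp) with
    | none => 0
    | some dp' => (PySem.List.pyGet? dp' n).getD 0

-- ===== PRECONDITION & SPEC =====
-- For n ≥ 3 Python's dp[n] (and the memo fill below it) needs n < len(dp), else IndexError.
def Pre_rec (n : Int) (dp : List Int) : Prop :=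
  n ≤ 2 ∨ n < PySem.List.len dp
instance (n : Int) (dp : List Int) : Decidable (Pre_rec n dp) := by unfold Pre_rec; infer_instance

def pvWitness_rec : Int × List Int := (5, [-1, -1, -1, -1, -1, -1])

def Spec_rec (n : Int) (dp : List Int) (out : Int) : Prop := out = rec_alt n dp
instance (n : Int) (dp : List Int) (out : Int) : Decidable (Spec_rec n dp out) := by unfold Spec_rec; infer_instance

-- ===== CLAIM (what is proved, stated in full; the proofs are below) =====
def Claim_equal_rec : Prop := ∀ (n : Int) (dp : List Int), Dom_rec n dp → Pre_rec n dp → Spec_rec n dp (rec n dp)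


-- ===== LEMMAS AND PROOFS =====

-- The unique memo-fixpoint value: what rec(i, dp0) denotes for the initial table dp0.
def V (dp0 : List Int) (i : Int) : Int :=
  if i ≤ 0 then 0
  else if i = 1 then 1
  else if i = 2 then 2
  else if dp0.getD i.toNat 0 ≠ -1 then dp0.getD i.toNat 0
  else V dp0 (i - 2) + V dp0 (i - 1)
  termination_by i.toNat
  decreasing_by all_goals omega

-- dp is a valid evolution of dp0: each entry is the original one, or was -1 and now holds its V-value.
def ConsM (dp0 dp : List Int) : Prop :=
  dp.length = dp0.length ∧
  ∀ k : Nat, dp.getD k 0 = dp0.getD k 0 ∨ (dp0.getD k 0 = -1 ∧ dp.getD k 0 = V dp0 (k : Int))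


-- small indexing facts specialised to our in-range uses
theorem pyGet?_getD (xs : List Int) (i : Int) (h0 : 0 ≤ i) (h : i.toNat < xs.length) :
    PySem.List.pyGet? xs i = some (xs.getD i.toNat 0) := by
  rw [PySem.List.pyGet?_of_nonneg xs h0, List.getElem?_eq_getElem h, List.getD_eq_getElem xs 0 h]

theorem pySet?_toNat (xs : List Int) (i : Int) (v : Int) (h0 : 0 ≤ i) (h : i.toNat < xs.length) :
    PySem.List.pySet? xs i v = some (xs.set i.toNat v) := by
  have h2 := PySem.List.pySet?_natCast xs i.toNat v h
  rwa [show ((i.toNat : Nat) : Int) = i by omega] at h2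

theorem getD_set_self (xs : List Int) (m : Nat) (v : Int) (h : m < xs.length) :
    (xs.set m v).getD m 0 = v := by
  rw [List.getD_eq_getElem _ 0 (by simpa using h)]
  simp [List.getElem_set_self]

theorem getD_set_ne (xs : List Int) (m k : Nat) (v : Int) (h : ¬ k = m) :
    (xs.set m v).getD k 0 = xs.getD k 0 := by
  simp [List.getD, List.getElem?_set_ne (by omega : m ≠ k)]

-- unfolding facts for V
theorem V_le0 (dp0 : List Int) {i : Int} (h : i ≤ 0) : V dp0 i = 0 := by rw [V]; simp [h]

theorem V_one (dp0 : List Int) : V dp0 1 = 1 := by rw [V]; simp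

theorem V_two (dp0 : List Int) : V dp0 2 = 2 := by rw [V]; simp

theorem V_memo (dp0 : List Int) {i : Int} (h3 : 3 ≤ i) (h : ¬ dp0.getD i.toNat 0 = -1) :
    V dp0 i = dp0.getD i.toNat 0 := by
  rw [V, if_neg (show ¬ i ≤ 0 by omega), if_neg (show ¬ i = 1 by omega),
    if_neg (show ¬ i = 2 by omega), if_pos h]

theorem V_rec (dp0 : List Int) {i : Int} (h3 : 3 ≤ i) (h : dp0.getD i.toNat 0 = -1) :
    V dp0 i = V dp0 (i - 2) + V dp0 (i - 1) := by
  rw [V, if_neg (show ¬ i ≤ 0 by omega), if_neg (show ¬ i = 1 by omega),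
    if_neg (show ¬ i = 2 by omega), if_neg (not_not_intro h)]

-- ===== A-side: the memoized recursion computes V and keeps the table consistent =====
theorem recAux_correct (dp0 : List Int) : ∀ (N : Nat) (n : Int) (dp : List Int),
    n.toNat ≤ N → ConsM dp0 dp → n < (dp0.length : Int) →
    ∃ dp', recAux n dp = some (V dp0 n, dp') ∧ ConsM dp0 dp' := by
  intro N
  induction N with
  | zero =>
    intro n dp hN hc hlt
    have hn0 : n ≤ 0 := by omega
    exact ⟨dp, by rw [recAux]; simp [hn0, V_le0 dp0 hn0], hc⟩
  | succ N ih =>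
    intro n dp hN hc hlt
    by_cases hn0 : n ≤ 0
    · exact ⟨dp, by rw [recAux]; simp [hn0, V_le0 dp0 hn0], hc⟩
    by_cases hn1 : n = 1
    · exact ⟨dp, by rw [recAux]; simp [hn1, V_one], hc⟩
    by_cases hn2 : n = 2
    · exact ⟨dp, by rw [recAux]; simp [hn2, V_two], hc⟩
    have hn3 : 3 ≤ n := by omega
    have hlen : n.toNat < dp.length := by rw [hc.1]; omega
    have hget := pyGet?_getD dp n (by omega) hlen
    have hcastn : ((n.toNat : Nat) : Int) = n := by omega
    by_cases hv : dp.getD n.toNat 0 = -1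
    · have hdp0n : dp0.getD n.toNat 0 = -1 := by
        rcases hc.2 n.toNat with h | h
        · rw [← h]; exact hv
        · exact h.1
      obtain ⟨dp1, h1, hc1⟩ := ih (n - 2) dp (by omega) hc (by omega)
      obtain ⟨dp2, h2, hc2⟩ := ih (n - 1) dp1 (by omega) hc1 (by omega)
      have hlen2 : n.toNat < dp2.length := by rw [hc2.1]; omega
      have hset := pySet?_toNat dp2 n (V dp0 (n - 2) + V dp0 (n - 1)) (by omega) hlen2
      have hVn : V dp0 n = V dp0 (n - 2) + V dp0 (n - 1) := V_rec dp0 hn3 hdp0n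
      refine ⟨dp2.set n.toNat (V dp0 (n - 2) + V dp0 (n - 1)), ?_, ?_, ?_⟩
      · rw [List.getD_eq_getElem?_getD] at hv
        rw [recAux]
        simp [hn0, hn1, hn2, hget, hv, h1, h2, hset, hVn]
      · simp [hc2.1]
      · intro k
        by_cases hk : k = n.toNat
        · subst hk
          right
          refine ⟨hdp0n, ?_⟩
          rw [getD_set_self _ _ _ hlen2, hcastn, hVn]
        · rw [getD_set_ne _ _ _ _ hk]
          exact hc2.2 k
    · refine ⟨dp, ?_, hc⟩
      have hvV : dp.getD n.toNat 0 = V dp0 n := by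
        rcases hc.2 n.toNat with h | h
        · rw [h]; exact (V_memo dp0 hn3 (by rw [← h]; exact hv)).symm
        · rw [h.2, hcastn]
      rw [recAux]
      simp only [if_neg hn0, if_neg hn1, if_neg hn2, hget]
      rw [if_pos hv, hvV]

-- ===== B-side: the bottom-up loop fills exactly the V-values =====
theorem valB_correct (dp0 dpj : List Int) (j : Nat) (hlen : dpj.length = dp0.length)
    (hinv : ∀ k : Nat, dpj.getD k 0 =
      if 3 ≤ (k : Int) ∧ (k : Int) ≤ 2 + (j : Int) then V dp0 (k : Int) else dp0.getD k 0)
    (i : Int) (h1 : 1 ≤ i) (h2 : i ≤ 2 + (j : Int)) (hi : i < (dp0.length : Int)) :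
    valB dpj i = some (V dp0 i) := by
  unfold valB
  by_cases i1 : i = 1
  · simp [i1, V_one]
  by_cases i2 : i = 2
  · simp [i2, V_two, show ¬ (2:Int) ≤ 0 by omega]
  have h3 : 3 ≤ i := by omega
  have hcast : ((i.toNat : Nat) : Int) = i := by omega
  have hilen : i.toNat < dpj.length := by rw [hlen]; omega
  rw [if_neg (by omega), if_neg i1, if_neg i2, pyGet?_getD dpj i (by omega) hilen, hinv i.toNat,
    hcast, if_pos ⟨h3, h2⟩]

theorem foldl_stepB_correct (dp0 : List Int) (n : Int) (hn3 : 3 ≤ n)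
    (hlen : n < (dp0.length : Int)) :
    ∀ (j : Nat), (2 + (j : Int)) ≤ n →
    ∃ dpm, (PySem.List.pyRange 3 (2 + (j : Int) + 1) 1).foldl stepB (some dp0) = some dpm ∧
      dpm.length = dp0.length ∧
      ∀ k : Nat, dpm.getD k 0 =
        if 3 ≤ (k : Int) ∧ (k : Int) ≤ 2 + (j : Int) then V dp0 (k : Int) else dp0.getD k 0 := by
  intro j
  induction j with
  | zero =>
    intro _
    refine ⟨dp0, ?_, rfl, ?_⟩
    · rw [show ((2:Int) + ((0:Nat):Int) + 1) = 3 by norm_num, PySem.List.pyRange_one_eq_nil le_rfl]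
      rfl
    · intro k
      rw [if_neg (by push_cast; omega)]
  | succ j ih =>
    intro hj1
    obtain ⟨dpj, hfold, hjlen, hinv⟩ := ih (by push_cast at hj1 ⊢; omega)
    set m : Int := 2 + (j : Int) + 1 with hm
    have hm3 : 3 ≤ m := by omega
    have hmn : m ≤ n := by push_cast at hj1; omega
    have hcastm : ((m.toNat : Nat) : Int) = m := by omega
    have hmlen : m.toNat < dpj.length := by rw [hjlen]; omega
    have hsplit : (2 + ((j + 1 : Nat) : Int) + 1) = m + 1 := by push_cast; ring
    rw [hsplit, PySem.List.pyRange_one_succ_right (by omega), List.foldl_append, hfold]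
    have hdpjm : dpj.getD m.toNat 0 = dp0.getD m.toNat 0 := by
      rw [hinv m.toNat, if_neg (by omega)]
    have hgetm := pyGet?_getD dpj m (by omega) hmlen
    by_cases h : dp0.getD m.toNat 0 = -1
    · have hv2 := valB_correct dp0 dpj j hjlen hinv (m - 2) (by omega) (by omega) (by omega)
      have hv1 := valB_correct dp0 dpj j hjlen hinv (m - 1) (by omega) (by omega) (by omega)
      have hset := pySet?_toNat dpj m (V dp0 (m - 2) + V dp0 (m - 1)) (by omega) hmlen
      have hVm : V dp0 m = V dp0 (m - 2) + V dp0 (m - 1) := V_rec dp0 hm3 h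
      refine ⟨dpj.set m.toNat (V dp0 (m - 2) + V dp0 (m - 1)), ?_, by simp [hjlen], ?_⟩
      · simp only [List.foldl_cons, List.foldl_nil, stepB, hgetm, hdpjm, h, if_pos, hv1, hv2]
        rw [hset]
      · intro k
        by_cases hk : k = m.toNat
        · subst hk
          rw [getD_set_self _ _ _ hmlen, hcastm, if_pos (by push_cast; omega), hVm]
        · rw [getD_set_ne _ _ _ _ hk, hinv k]
          have hkm : (k : Int) ≠ m := by omega
          split_ifs <;> first | rfl | (exfalso; omega)
    · refine ⟨dpj, ?_, hjlen, ?_⟩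
      · rw [List.getD_eq_getElem?_getD] at hdpjm
        have h' : ¬ dp0[m.toNat]?.getD 0 = -1 := by rw [← List.getD_eq_getElem?_getD]; exact h
        simp only [List.foldl_cons, List.foldl_nil, stepB, hgetm]
        simp [hdpjm, h']
      · intro k
        rw [hinv k]
        by_cases hk : k = m.toNat
        · subst hk
          rw [if_neg (by omega), if_pos (by constructor <;> omega), hcastm,
            V_memo dp0 hm3 h]
        · have hkm : (k : Int) ≠ m := by omega
          split_ifs <;> first | rfl | (exfalso; omega)

-- ===== VERDICT (by name: the statement is the Claim_ definition above) =====
theorem rec_spec : Claim_equal_rec := by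
  intro n dp hdom hpre
  unfold Spec_rec rec rec_alt
  by_cases hn0 : n ≤ 0
  · rw [recAux]; simp [hn0]
  by_cases hn1 : n = 1
  · rw [recAux]; simp [hn0, hn1]
  by_cases hn2 : n = 2
  · rw [recAux]; simp [hn0, hn1, hn2]
  have hn3 : 3 ≤ n := by omega
  have hlen : n < (dp.length : Int) := by
    rcases hpre with h | h
    · omega
    · rwa [PySem.List.len_eq] at h
  obtain ⟨dpA, hA, _⟩ := recAux_correct dp n.toNat n dp le_rfl ⟨rfl, fun k => Or.inl rfl⟩ hlen
  obtain ⟨dpB, hB, hBlen, hBinv⟩ := foldl_stepB_correct dp n hn3 hlen (n - 2).toNat (by omega)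
  rw [show (2 + (((n - 2).toNat : Nat) : Int) + 1) = n + 1 by omega] at hB
  have hcond : 2 + (((n - 2).toNat : Nat) : Int) = n := by omega
  have hcastn : ((n.toNat : Nat) : Int) = n := by omega
  rw [hA, hB]
  simp only [hn0, hn1, hn2, if_false]
  rw [pyGet?_getD dpB n (by omega) (by rw [hBlen]; omega), hBinv n.toNat, hcond, hcastn,
    if_pos ⟨hn3, le_refl n⟩]
  simp [hn0, hn1, hn2]
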